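-- pv_equiv track=rewrite | github.com/0xGeN02/University | 2/ComplejidadComputacuional/Practica1/laberinto2.py | resolver_laberinto
-- ===== SOURCE A (Python) =====
-- def resolver_laberinto(laberinto, x, y, solucion, visitado):
--     # Si ha llegado al final, termina
--     if x == len(laberinto) - 1 and y == len(laberinto[0]) - 1:
--         solucion[x][y] = 2
--         return True
--
--     if es_valido(laberinto, x, y, visitado):
--         solucion[x][y] = 2  # Marcar el camino como parte de la solución
--         visitado[x][y] = True
--
--         # Si es posible, nos movemos hacia abajo
--         if resolver_laberinto(laberinto, x + 1, y, solucion, visitado):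
--             return True
--
--         # En caso contrario, si es posible, nos movemos hacia la derecha
--         if resolver_laberinto(laberinto, x, y + 1, solucion, visitado):
--             return True
--
--         # En caso contrario, si es posible, nos movemos hacia arriba
--         # COD05
--         if resolver_laberinto(laberinto, x - 1, y, solucion, visitado):
--             return True
--         # En caso contrario, si es posible, nos movemos hacia la izquierda
--         # COD06
--         if resolver_laberinto(laberinto, x, y - 1, solucion, visitado):
--             return True
--         # Si no es posible moverse en ninguna direcciòn, desmarcamos la posición actual (backtrack)
--         solucion[x][y] = 0
--         visitado[x][y] = False
--         return False
--
--     return False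
--
-- def es_valido(laberinto, x, y, visitado):
--     return (0 <= x < len(laberinto) and 0 <= y < len(laberinto[0]) and
--             laberinto[x][y] == 1 and not visitado[x][y])
-- ===== SOURCE B (Python) =====
-- def resolver_laberinto(laberinto, x, y, solucion, visitado):
--     # Iterative DFS with an explicit stack of (cell, next-direction) frames
--     # instead of recursion; same down/right/up/left order, same marking and
--     # backtrack-reset of solucion/visitado, same return value.
--     n, m = len(laberinto), len(laberinto[0])
--     if x == n - 1 and y == m - 1:
--         solucion[x][y] = 2
--         return True
--     if not (0 <= x < n and 0 <= y < m and laberinto[x][y] == 1 and not visitado[x][y]):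
--         return False
--     solucion[x][y] = 2
--     visitado[x][y] = True
--     DIRS = ((1, 0), (0, 1), (-1, 0), (0, -1))
--     stack = [(x, y, 0)]
--     while stack:
--         cx, cy, d = stack[-1]
--         if d == 4:
--             # all four directions failed: backtrack
--             solucion[cx][cy] = 0
--             visitado[cx][cy] = False
--             stack.pop()
--             continue
--         stack[-1] = (cx, cy, d + 1)
--         nx, ny = cx + DIRS[d][0], cy + DIRS[d][1]
--         if nx == n - 1 and ny == m - 1:
--             solucion[nx][ny] = 2
--             return True
--         if 0 <= nx < n and 0 <= ny < m and laberinto[nx][ny] == 1 and not visitado[nx][ny]: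
--             solucion[nx][ny] = 2
--             visitado[nx][ny] = True
--             stack.append((nx, ny, 0))
--     return False
-- ===== Notes on version B (the rewrite author's own statement) =====
-- stated objective: alternative
-- what changed: The recursive backtracking DFS is replaced by an iterative DFS driven by an explicit stack of (cell, next-direction) frames, preserving the down/right/up/left order, the goal-before-validity check and the backtrack resets of solucion/visitado.
-- outside the precondition, e.g. on resolver_laberinto([[1, 0], [0]], 0, 0, [[0, 0], [0]], [[False, False], [False]]): A returns False, B returns False; on resolver_laberinto([], 0, 0, [], []): A returns False, B raises IndexError
import Mathlib
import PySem

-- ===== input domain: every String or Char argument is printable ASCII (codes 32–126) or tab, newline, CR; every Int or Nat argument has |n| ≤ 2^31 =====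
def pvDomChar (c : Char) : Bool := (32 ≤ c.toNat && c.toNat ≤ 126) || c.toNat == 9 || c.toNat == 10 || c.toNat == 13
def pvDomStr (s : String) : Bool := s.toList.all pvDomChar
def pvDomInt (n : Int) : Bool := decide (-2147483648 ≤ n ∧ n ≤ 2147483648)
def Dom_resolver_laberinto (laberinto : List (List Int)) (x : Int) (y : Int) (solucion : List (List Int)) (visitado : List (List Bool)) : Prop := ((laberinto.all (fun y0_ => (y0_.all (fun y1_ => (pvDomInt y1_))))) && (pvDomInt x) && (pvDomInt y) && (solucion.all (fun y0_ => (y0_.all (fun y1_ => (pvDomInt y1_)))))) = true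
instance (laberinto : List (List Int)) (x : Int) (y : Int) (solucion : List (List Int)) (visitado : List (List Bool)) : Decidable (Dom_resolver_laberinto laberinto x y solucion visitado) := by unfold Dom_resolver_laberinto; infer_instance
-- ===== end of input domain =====

-- B replaces A's recursive backtracking DFS by an iterative DFS over an explicit
-- stack of (cell, next-direction) frames, keeping the down/right/up/left order and
-- the backtrack resets; equivalence is proved for the returned Bool (both versions
-- also mutate solucion/visitado in Python, performing the same writes).

-- ===== PORT A =====
-- mat[x][y] read with Python index semantics (negative wraps, out-of-range = IndexError;
-- the .getD default is only reached on inputs excluded by Pre_).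
def get2I (mat : List (List Int)) (x y : Int) : Int :=
  (PySem.List.pyGet? ((PySem.List.pyGet? mat x).getD []) y).getD 0
def get2B (mat : List (List Bool)) (x y : Int) : Bool :=
  (PySem.List.pyGet? ((PySem.List.pyGet? mat x).getD []) y).getD false
-- mat[x][y] = v  (PySem.List.pySetD: Python assignment; identity out of range, which
-- is only reached on inputs excluded by Pre_).
def set2 {α : Type} (mat : List (List α)) (x y : Int) (v : α) : List (List α) :=
  PySem.List.pySetD mat x (PySem.List.pySetD ((PySem.List.pyGet? mat x).getD []) y v)

-- len(laberinto[0]) is laberinto.headI.length (exact for laberinto ≠ [], required by Pre_)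
def es_valido (laberinto : List (List Int)) (x y : Int) (visitado : List (List Bool)) : Bool :=
  decide (0 ≤ x) && decide (x < (laberinto.length : Int)) &&
  decide (0 ≤ y) && decide (y < (laberinto.headI.length : Int)) &&
  (get2I laberinto x y == 1) && (!get2B visitado x y)

-- number of False entries of visitado (used only to size the fuel of the ports' loops)
def cnt (vis : List (List Bool)) : Nat := (vis.map (fun r => r.count false)).sum

-- A's recursion, fuel-indexed (none = fuel exhausted; the fuel chosen below is proved
-- sufficient in enterA_total, so the port computes exactly what the Python recursion does).
def enterA : Nat → List (List Int) → Int → Int → List (List Int) → List (List Bool) →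
    Option (Bool × List (List Int) × List (List Bool))
  | 0, _, _, _, _, _ => none
  | f+1, lab, x, y, sol, vis =>
    if x == (lab.length : Int) - 1 && y == (lab.headI.length : Int) - 1 then
      some (true, set2 sol x y 2, vis)
    else if es_valido lab x y vis then
      let sol1 := set2 sol x y 2
      let vis1 := set2 vis x y true
      match enterA f lab (x+1) y sol1 vis1 with
      | none => none
      | some (true, s, v) => some (true, s, v)
      | some (false, s2, v2) =>
        match enterA f lab x (y+1) s2 v2 with
        | none => none
        | some (true, s, v) => some (true, s, v)
        | some (false, s3, v3) =>
          match enterA f lab (x-1) y s3 v3 with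
          | none => none
          | some (true, s, v) => some (true, s, v)
          | some (false, s4, v4) =>
            match enterA f lab x (y-1) s4 v4 with
            | none => none
            | some (true, s, v) => some (true, s, v)
            | some (false, s5, v5) => some (false, set2 s5 x y 0, set2 v5 x y false)
    else some (false, sol, vis)

def resolver_laberinto (laberinto : List (List Int)) (x : Int) (y : Int) (solucion : List (List Int)) (visitado : List (List Bool)) : Bool :=
  match enterA (cnt visitado + 1) laberinto x y solucion visitado with
  | some (b, _, _) => b
  | none => false   -- unreachable under Pre_ (enterA_total)

-- ===== PORT B =====
def dirs : Nat → Int × Int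
  | 0 => (1, 0)
  | 1 => (0, 1)
  | 2 => (-1, 0)
  | _ => (0, -1)

-- the while-loop of Source B, fuel-indexed (none = fuel exhausted; the fuel chosen below
-- is proved sufficient).  Frames are (cx, cy, next direction d).
def runB : Nat → List (List Int) → List (Int × Int × Nat) → List (List Int) → List (List Bool) → Option Bool
  | 0, _, _, _, _ => none
  | _+1, _, [], _, _ => some false
  | f+1, lab, (cx, cy, d) :: st, sol, vis =>
    if 4 ≤ d then
      runB f lab st (set2 sol cx cy 0) (set2 vis cx cy false)
    else
      if (cx + (dirs d).1) == (lab.length : Int) - 1 && (cy + (dirs d).2) == (lab.headI.length : Int) - 1 then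
        some true
      else if es_valido lab (cx + (dirs d).1) (cy + (dirs d).2) vis then
        runB f lab ((cx + (dirs d).1, cy + (dirs d).2, 0) :: (cx, cy, d+1) :: st)
          (set2 sol (cx + (dirs d).1) (cy + (dirs d).2) 2)
          (set2 vis (cx + (dirs d).1) (cy + (dirs d).2) true)
      else
        runB f lab ((cx, cy, d+1) :: st) sol vis

def resolver_laberinto_alt (laberinto : List (List Int)) (x : Int) (y : Int) (solucion : List (List Int)) (visitado : List (List Bool)) : Bool :=
  if x == (laberinto.length : Int) - 1 && y == (laberinto.headI.length : Int) - 1 then true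
  else if es_valido laberinto x y visitado then
    match runB (6 ^ (cnt visitado + 1) + 1) laberinto [(x, y, 0)]
        (set2 solucion x y 2) (set2 visitado x y true) with
    | some r => r
    | none => false   -- unreachable under Pre_ (fuel proved sufficient)
  else false

-- ===== PRECONDITION & SPEC =====
-- Pre_ admits exactly (a) well-formed inputs: a nonempty rectangular laberinto with
-- solucion and visitado of the same shape, on which A never raises for any x, y; and two
-- families of malformed-shape inputs on which A still returns without indexing a missing
-- cell: (b) the start is the goal cell and solucion has that cell, (c) es_valido rejects
-- the start immediately.  Other malformed-shape inputs are excluded because A raises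
-- IndexError on them (len(laberinto[0]) on [], or a row shorter than row 0 reached by the
-- search); this also excludes some malformed inputs where the search happens to fail
-- before touching a short row, on which A returns False (see claim cites).
def Pre_resolver_laberinto (laberinto : List (List Int)) (x : Int) (y : Int) (solucion : List (List Int)) (visitado : List (List Bool)) : Prop :=
  laberinto ≠ [] ∧
  ( (1 ≤ laberinto.headI.length ∧
     (∀ r ∈ laberinto, r.length = laberinto.headI.length) ∧
     solucion.length = laberinto.length ∧
     (∀ r ∈ solucion, r.length = laberinto.headI.length) ∧
     visitado.length = laberinto.length ∧
     (∀ r ∈ visitado, r.length = laberinto.headI.length))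
    ∨
    (x = (laberinto.length : Int) - 1 ∧ y = (laberinto.headI.length : Int) - 1 ∧
     1 ≤ laberinto.headI.length ∧
     laberinto.length ≤ solucion.length ∧
     laberinto.headI.length ≤ (solucion.getD (laberinto.length - 1) []).length)
    ∨
    (¬(x = (laberinto.length : Int) - 1 ∧ y = (laberinto.headI.length : Int) - 1) ∧
     ((x < 0 ∨ (laberinto.length : Int) ≤ x ∨ y < 0 ∨ (laberinto.headI.length : Int) ≤ y) ∨
      (0 ≤ x ∧ x < (laberinto.length : Int) ∧ 0 ≤ y ∧ y < (laberinto.headI.length : Int) ∧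
       y.toNat < (laberinto.getD x.toNat []).length ∧
       ((laberinto.getD x.toNat []).getD y.toNat 0 ≠ 1 ∨
        (x.toNat < visitado.length ∧ y.toNat < (visitado.getD x.toNat []).length ∧
         (visitado.getD x.toNat []).getD y.toNat false = true))))) )

instance (laberinto : List (List Int)) (x : Int) (y : Int) (solucion : List (List Int)) (visitado : List (List Bool)) : Decidable (Pre_resolver_laberinto laberinto x y solucion visitado) := by unfold Pre_resolver_laberinto; infer_instance

def pvWitness_resolver_laberinto : List (List Int) × Int × Int × List (List Int) × List (List Bool) :=
  ([[1, 1], [0, 1]], 0, 0, [[0, 0], [0, 0]], [[false, false], [false, false]])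

def Spec_resolver_laberinto (laberinto : List (List Int)) (x : Int) (y : Int) (solucion : List (List Int)) (visitado : List (List Bool)) (out : Bool) : Prop := out = resolver_laberinto_alt laberinto x y solucion visitado
instance (laberinto : List (List Int)) (x : Int) (y : Int) (solucion : List (List Int)) (visitado : List (List Bool)) (out : Bool) : Decidable (Spec_resolver_laberinto laberinto x y solucion visitado out) := by unfold Spec_resolver_laberinto; infer_instance

-- ===== CLAIM (what is proved, stated in full; the proofs are below) =====
def Claim_equal_resolver_laberinto : Prop := ∀ (laberinto : List (List Int)) (x : Int) (y : Int) (solucion : List (List Int)) (visitado : List (List Bool)), Dom_resolver_laberinto laberinto x y solucion visitado → Pre_resolver_laberinto laberinto x y solucion visitado → Spec_resolver_laberinto laberinto x y solucion visitado (resolver_laberinto laberinto x y solucion visitado)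

-- ===== LEMMAS AND PROOFS =====

-- shape invariant used by the proofs: visitado matches laberinto's shape
def Shape (lab : List (List Int)) (vis : List (List Bool)) : Prop :=
  vis.length = lab.length ∧ ∀ r ∈ vis, r.length = lab.headI.length

-- the body of Source B's loop from the point where a move to (x, y) is attempted
def attemptB (f : Nat) (lab : List (List Int)) (st : List (Int × Int × Nat)) (x y : Int)
    (sol : List (List Int)) (vis : List (List Bool)) : Option Bool :=
  if x == (lab.length : Int) - 1 && y == (lab.headI.length : Int) - 1 then some true
  else if es_valido lab x y vis then
    runB f lab ((x, y, 0) :: st) (set2 sol x y 2) (set2 vis x y true)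
  else runB f lab st sol vis

theorem runB_cons (f : Nat) (lab : List (List Int)) (cx cy : Int) (d : Nat)
    (st : List (Int × Int × Nat)) (sol : List (List Int)) (vis : List (List Bool)) :
    runB (f+1) lab ((cx, cy, d) :: st) sol vis =
      if 4 ≤ d then runB f lab st (set2 sol cx cy 0) (set2 vis cx cy false)
      else attemptB f lab ((cx, cy, d+1) :: st) (cx + (dirs d).1) (cy + (dirs d).2) sol vis := rfl

theorem set2_eq {α : Type} (mat : List (List α)) (x y : Int) (v : α)
    (hx : 0 ≤ x) (hxl : x.toNat < mat.length) (hy : 0 ≤ y) :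
    set2 mat x y v = mat.set x.toNat ((mat[x.toNat]).set y.toNat v) := by
  unfold set2
  rw [PySem.List.pySetD_of_nonneg _ _ hx, PySem.List.pyGet?_of_nonneg _ hx,
    PySem.List.pySetD_of_nonneg _ _ hy]
  simp [List.getElem?_eq_getElem hxl]

theorem set2_oor {α : Type} (mat : List (List α)) (x y : Int) (v : α)
    (hx : 0 ≤ x) (hxl : mat.length ≤ x.toNat) :
    set2 mat x y v = mat := by
  unfold set2
  rw [PySem.List.pySetD_of_nonneg _ _ hx, PySem.List.pyGet?_of_nonneg _ hx]
  rw [List.getElem?_eq_none hxl]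
  simp [List.set_eq_of_length_le hxl]

theorem get2B_eq (vis : List (List Bool)) (x y : Int)
    (hx : 0 ≤ x) (hxl : x.toNat < vis.length) (hy : 0 ≤ y) (hyl : y.toNat < (vis[x.toNat]).length) :
    get2B vis x y = vis[x.toNat][y.toNat] := by
  unfold get2B
  rw [PySem.List.pyGet?_of_nonneg _ hx, List.getElem?_eq_getElem hxl]
  rw [PySem.List.pyGet?_of_nonneg _ hy]
  simp [List.getElem?_eq_getElem hyl]

theorem get2I_eq (lab : List (List Int)) (x y : Int)
    (hx : 0 ≤ x) (hxl : x.toNat < lab.length) (hy : 0 ≤ y) (hyl : y.toNat < (lab[x.toNat]).length) :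
    get2I lab x y = lab[x.toNat][y.toNat] := by
  unfold get2I
  rw [PySem.List.pyGet?_of_nonneg _ hx, List.getElem?_eq_getElem hxl]
  rw [PySem.List.pyGet?_of_nonneg _ hy]
  simp [List.getElem?_eq_getElem hyl]

theorem shape_set2 (lab : List (List Int)) (vis : List (List Bool)) (x y : Int) (v : Bool)
    (hx : 0 ≤ x) (sh : Shape lab vis) : Shape lab (set2 vis x y v) := by
  rcases Nat.lt_or_ge x.toNat vis.length with hxl | hxl
  · rcases sh with ⟨h1, h2⟩
    unfold set2
    rw [PySem.List.pySetD_of_nonneg _ _ hx, PySem.List.pyGet?_of_nonneg _ hx,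
      List.getElem?_eq_getElem hxl]
    constructor
    · simpa using h1
    · intro r hr
      rcases List.mem_or_eq_of_mem_set hr with hm | he
      · exact h2 r hm
      · subst he
        rw [PySem.List.length_pySetD]
        exact h2 _ (List.getElem_mem hxl)
  · rw [set2_oor vis x y v hx hxl]; exact sh

theorem cnt_set (vis : List (List Bool)) (j : Nat) (r' : List Bool) (hj : j < vis.length) :
    cnt (vis.set j r') + (vis[j]).count false = cnt vis + r'.count false := by
  induction vis generalizing j with
  | nil => simp at hj
  | cons a l ih =>
    cases j with
    | zero => simp [cnt]; omega
    | succ j =>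
      have hj' : j < l.length := by simpa using hj
      have := ih j hj'
      simp only [List.set_cons_succ, cnt, List.map_cons, List.sum_cons, List.getElem_cons_succ]
      simp only [cnt] at this
      omega

theorem count_set_false (r : List Bool) (k : Nat) (hk : k < r.length) (hf : r[k] = false) :
    (r.set k true).count false + 1 = r.count false := by
  induction r generalizing k with
  | nil => simp at hk
  | cons a t ih =>
    cases k with
    | zero =>
      simp only [List.getElem_cons_zero] at hf; subst hf
      simp
    | succ k =>
      have hk' : k < t.length := by simpa using hk
      have hf' : t[k] = false := by simpa using hf
      have := ih k hk' hf'
      simp only [List.set_cons_succ, List.count_cons]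
      omega

theorem valid_parts (lab : List (List Int)) (x y : Int) (vis : List (List Bool))
    (hv : es_valido lab x y vis = true) :
    0 ≤ x ∧ x < (lab.length : Int) ∧ 0 ≤ y ∧ y < (lab.headI.length : Int) ∧
    get2I lab x y = 1 ∧ get2B vis x y = false := by
  unfold es_valido at hv
  simp only [Bool.and_eq_true, decide_eq_true_eq, beq_iff_eq, Bool.not_eq_eq_eq_not,
    Bool.not_true] at hv
  tauto

theorem cnt_mark (lab : List (List Int)) (vis : List (List Bool)) (x y : Int)
    (sh : Shape lab vis) (hv : es_valido lab x y vis = true) :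
    cnt (set2 vis x y true) + 1 = cnt vis := by
  obtain ⟨hx, hxn, hy, hym, _, hb⟩ := valid_parts lab x y vis hv
  have hxl : x.toNat < vis.length := by have e := sh.1; omega
  have hyl : y.toNat < (vis[x.toNat]).length := by
    have hm := sh.2 (vis[x.toNat]) (List.getElem_mem hxl)
    rw [hm]; omega
  rw [set2_eq vis x y true hx hxl hy]
  have h1 := cnt_set vis x.toNat ((vis[x.toNat]).set y.toNat true) hxl
  have h2 := count_set_false (vis[x.toNat]) y.toNat hyl (by rw [← get2B_eq vis x y hx hxl hy hyl]; exact hb)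
  omega

theorem set2_cancel (vis : List (List Bool)) (x y : Int)
    (hx : 0 ≤ x) (hy : 0 ≤ y) (hb : get2B vis x y = false) :
    set2 (set2 vis x y true) x y false = vis := by
  rcases Nat.lt_or_ge x.toNat vis.length with hxl | hxl
  · rcases Nat.lt_or_ge y.toNat (vis[x.toNat]).length with hyl | hyl
    · have hf : vis[x.toNat][y.toNat] = false := by
        rw [← get2B_eq vis x y hx hxl hy hyl]; exact hb
      rw [set2_eq vis x y true hx hxl hy,
        set2_eq _ x y false hx (by simpa using hxl) hy]
      simp only [List.getElem_set_self, List.set_set]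
      rw [← hf, List.set_getElem_self hyl, List.set_getElem_self hxl]
    · have hrow : (vis[x.toNat]).set y.toNat true = vis[x.toNat] :=
        List.set_eq_of_length_le hyl
      rw [set2_eq vis x y true hx hxl hy, hrow, List.set_getElem_self hxl,
        set2_eq vis x y false hx hxl hy,
        List.set_eq_of_length_le hyl, List.set_getElem_self hxl]
  · rw [set2_oor vis x y true hx hxl, set2_oor vis x y false hx hxl]

theorem enterA_restore : ∀ (f : Nat) (lab : List (List Int)) (x y : Int) (sol : List (List Int))
    (vis : List (List Bool)) (sol' : List (List Int)) (vis' : List (List Bool)),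
    enterA f lab x y sol vis = some (false, sol', vis') → vis' = vis := by
  intro f
  induction f with
  | zero => intro lab x y sol vis sol' vis' h; simp [enterA] at h
  | succ f ih =>
    intro lab x y sol vis sol' vis' h
    simp only [enterA] at h
    by_cases hg : (x == (lab.length : Int) - 1 && y == (lab.headI.length : Int) - 1) = true
    · rw [if_pos hg] at h; simp at h
    · rw [if_neg hg] at h
      by_cases hv : es_valido lab x y vis = true
      · rw [if_pos hv] at h
        obtain ⟨hx, hxn, hy, hym, _, hb⟩ := valid_parts lab x y vis hv
        cases h1 : enterA f lab (x+1) y (set2 sol x y 2) (set2 vis x y true) with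
        | none => rw [h1] at h; simp at h
        | some p1 =>
          obtain ⟨b1, s2, v2⟩ := p1
          rw [h1] at h
          cases b1 with
          | true => simp at h
          | false =>
            dsimp only at h
            cases h2 : enterA f lab x (y+1) s2 v2 with
            | none => rw [h2] at h; simp at h
            | some p2 =>
              obtain ⟨b2, s3, v3⟩ := p2
              rw [h2] at h
              cases b2 with
              | true => simp at h
              | false =>
                dsimp only at h
                cases h3 : enterA f lab (x-1) y s3 v3 with
                | none => rw [h3] at h; simp at h
                | some p3 =>
                  obtain ⟨b3, s4, v4⟩ := p3
                  rw [h3] at h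
                  cases b3 with
                  | true => simp at h
                  | false =>
                    dsimp only at h
                    cases h4 : enterA f lab x (y-1) s4 v4 with
                    | none => rw [h4] at h; simp at h
                    | some p4 =>
                      obtain ⟨b4, s5, v5⟩ := p4
                      rw [h4] at h
                      cases b4 with
                      | true => simp at h
                      | false =>
                        dsimp only at h
                        simp only [Option.some_inj, Prod.mk.injEq] at h
                        obtain ⟨-, -, hvv⟩ := h
                        have hv5 : v5 = set2 vis x y true := by
                          rw [ih lab x (y-1) s4 v4 s5 v5 h4,
                            ih lab (x-1) y s3 v3 s4 v4 h3,
                            ih lab x (y+1) s2 v2 s3 v3 h2,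
                            ih lab (x+1) y _ _ s2 v2 h1]
                        rw [← hvv, hv5]
                        exact set2_cancel vis x y hx hy hb
      · rw [if_neg hv] at h
        simp only [Option.some_inj, Prod.mk.injEq] at h
        exact h.2.2.symm

theorem enterA_total : ∀ (f : Nat) (lab : List (List Int)) (x y : Int) (sol : List (List Int))
    (vis : List (List Bool)), Shape lab vis → cnt vis < f →
    ∃ out, enterA f lab x y sol vis = some out := by
  intro f
  induction f with
  | zero => intro lab x y sol vis sh hc; omega
  | succ f ih =>
    intro lab x y sol vis sh hc
    by_cases hg : (x == (lab.length : Int) - 1 && y == (lab.headI.length : Int) - 1) = true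
    · exact ⟨_, by simp only [enterA]; rw [if_pos hg]⟩
    · by_cases hv : es_valido lab x y vis = true
      · obtain ⟨hx, hxn, hy, hym, _, hb⟩ := valid_parts lab x y vis hv
        have sh1 : Shape lab (set2 vis x y true) := shape_set2 lab vis x y true hx sh
        have hc1 : cnt (set2 vis x y true) < f := by
          have := cnt_mark lab vis x y sh hv; omega
        obtain ⟨⟨b1, s2, v2⟩, h1⟩ := ih lab (x+1) y (set2 sol x y 2) (set2 vis x y true) sh1 hc1
        cases b1 with
        | true => exact ⟨_, by simp only [enterA]; rw [if_neg hg, if_pos hv, h1]⟩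
        | false =>
          have hv2 : v2 = set2 vis x y true := enterA_restore f lab (x+1) y _ _ s2 v2 h1
          have sh2 : Shape lab v2 := hv2 ▸ sh1
          have hc2 : cnt v2 < f := by rw [hv2]; exact hc1
          obtain ⟨⟨b2, s3, v3⟩, h2⟩ := ih lab x (y+1) s2 v2 sh2 hc2
          cases b2 with
          | true => exact ⟨_, by simp only [enterA]; rw [if_neg hg, if_pos hv, h1]; dsimp only; rw [h2]⟩
          | false =>
            have hv3 : v3 = v2 := enterA_restore f lab x (y+1) s2 v2 s3 v3 h2
            have sh3 : Shape lab v3 := hv3 ▸ sh2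
            have hc3 : cnt v3 < f := by rw [hv3]; exact hc2
            obtain ⟨⟨b3, s4, v4⟩, h3⟩ := ih lab (x-1) y s3 v3 sh3 hc3
            cases b3 with
            | true => exact ⟨_, by simp only [enterA]; rw [if_neg hg, if_pos hv, h1]; dsimp only; rw [h2]; dsimp only; rw [h3]⟩
            | false =>
              have hv4 : v4 = v3 := enterA_restore f lab (x-1) y s3 v3 s4 v4 h3
              have sh4 : Shape lab v4 := hv4 ▸ sh3
              have hc4 : cnt v4 < f := by rw [hv4]; exact hc3
              obtain ⟨⟨b4, s5, v5⟩, h4⟩ := ih lab x (y-1) s4 v4 sh4 hc4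
              cases b4 with
              | true => exact ⟨_, by simp only [enterA]; rw [if_neg hg, if_pos hv, h1]; dsimp only; rw [h2]; dsimp only; rw [h3]; dsimp only; rw [h4]⟩
              | false => exact ⟨_, by simp only [enterA]; rw [if_neg hg, if_pos hv, h1]; dsimp only; rw [h2]; dsimp only; rw [h3]; dsimp only; rw [h4]⟩
      · exact ⟨_, by simp only [enterA]; rw [if_neg hg, if_neg hv]⟩

theorem runB_mono_succ : ∀ (f : Nat) (lab : List (List Int)) (st : List (Int × Int × Nat))
    (sol : List (List Int)) (vis : List (List Bool)) (r : Bool),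
    runB f lab st sol vis = some r → runB (f+1) lab st sol vis = some r := by
  intro f
  induction f with
  | zero => intro lab st sol vis r h; simp [runB] at h
  | succ f ih =>
    intro lab st sol vis r h
    cases st with
    | nil => simpa [runB] using h
    | cons fr st =>
      obtain ⟨cx, cy, d⟩ := fr
      rw [runB_cons] at h
      rw [runB_cons]
      by_cases hd : 4 ≤ d
      · rw [if_pos hd] at h ⊢
        exact ih lab st _ _ r h
      · rw [if_neg hd] at h ⊢
        unfold attemptB at h ⊢
        by_cases hg : ((cx + (dirs d).1) == (lab.length : Int) - 1 && (cy + (dirs d).2) == (lab.headI.length : Int) - 1) = true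
        · simp only [hg, if_true] at h ⊢; exact h
        · simp only [hg] at h ⊢
          by_cases hv : es_valido lab (cx + (dirs d).1) (cy + (dirs d).2) vis = true
          · simp only [hv, if_true] at h ⊢; exact ih lab _ _ _ r h
          · simp only [hv] at h ⊢; exact ih lab _ _ _ r h

theorem runB_mono : ∀ (f f' : Nat) (lab : List (List Int)) (st : List (Int × Int × Nat))
    (sol : List (List Int)) (vis : List (List Bool)) (r : Bool), f ≤ f' →
    runB f lab st sol vis = some r → runB f' lab st sol vis = some r := by
  intro f f' lab st sol vis r h hr
  induction f' with
  | zero =>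
    have : f = 0 := by omega
    subst this; exact hr
  | succ g ih =>
    rcases Nat.lt_or_ge g f with hlt | hge
    · have : f = g + 1 := by omega
      subst this; exact hr
    · exact runB_mono_succ g lab st sol vis r (ih hge)

theorem simQ : ∀ (f : Nat) (lab : List (List Int)) (x y : Int) (sol : List (List Int))
    (vis : List (List Bool)) (b : Bool) (sol' : List (List Int)) (vis' : List (List Bool)),
    enterA f lab x y sol vis = some (b, sol', vis') →
    ∀ st : List (Int × Int × Nat),
      (b = true → attemptB (6 ^ f) lab st x y sol vis = some true) ∧
      (b = false → ∀ (fr : Nat) (r : Bool), runB fr lab st sol' vis' = some r →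
          attemptB (6 ^ f + fr) lab st x y sol vis = some r) := by
  intro f
  induction f with
  | zero => intro lab x y sol vis b sol' vis' hA st; simp [enterA] at hA
  | succ f ih =>
    intro lab x y sol vis b sol' vis' hA st
    simp only [enterA] at hA
    by_cases hg : (x == (lab.length : Int) - 1 && y == (lab.headI.length : Int) - 1) = true
    · rw [if_pos hg] at hA
      simp only [Option.some_inj, Prod.mk.injEq] at hA
      obtain ⟨hbb, -, -⟩ := hA
      constructor
      · intro _
        simp only [attemptB]; rw [if_pos hg]
      · intro hb; rw [hb] at hbb; simp at hbb
    · rw [if_neg hg] at hA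
      by_cases hv : es_valido lab x y vis = true
      · rw [if_pos hv] at hA
        cases h1 : enterA f lab (x+1) y (set2 sol x y 2) (set2 vis x y true) with
        | none => rw [h1] at hA; simp at hA
        | some p1 =>
          obtain ⟨b1, s2, v2⟩ := p1
          rw [h1] at hA
          have hf1 : 1 ≤ f := by
            cases f with
            | zero => exact absurd h1 (by simp [enterA])
            | succ f0 => omega
          have hp6 : 6 ≤ 6 ^ f := Nat.le_self_pow (by omega) 6
          have hps : 6 ^ (f+1) = 6 ^ f * 6 := pow_succ 6 f
          cases b1 with
          | true =>
            dsimp only at hA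
            simp only [Option.some_inj, Prod.mk.injEq] at hA
            obtain ⟨hbb, -, -⟩ := hA
            constructor
            · intro _
              have A1 := (ih lab (x+1) y _ _ true s2 v2 h1 ((x,y,1)::st)).1 rfl
              have A1' : attemptB (6^f) lab ((x,y,1)::st) (x + (dirs 0).1) (y + (dirs 0).2) (set2 sol x y 2) (set2 vis x y true) = some true := by
                simpa [dirs] using A1
              have S1 : runB (6^f + 1) lab ((x,y,0)::st) (set2 sol x y 2) (set2 vis x y true) = some true := by
                rw [runB_cons, if_neg (by norm_num)]; exact A1'
              simp only [attemptB]; rw [if_neg hg, if_pos hv]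
              exact runB_mono _ _ _ _ _ _ _ (by omega) S1
            · intro hb; rw [hb] at hbb; simp at hbb
          | false =>
            dsimp only at hA
            cases h2 : enterA f lab x (y+1) s2 v2 with
            | none => rw [h2] at hA; simp at hA
            | some p2 =>
              obtain ⟨b2, s3, v3⟩ := p2
              rw [h2] at hA
              cases b2 with
              | true =>
                dsimp only at hA
                simp only [Option.some_inj, Prod.mk.injEq] at hA
                obtain ⟨hbb, -, -⟩ := hA
                constructor
                · intro _
                  have A2 := (ih lab x (y+1) _ _ true s3 v3 h2 ((x,y,2)::st)).1 rfl
                  have A2' : attemptB (6^f) lab ((x,y,2)::st) (x + (dirs 1).1) (y + (dirs 1).2) s2 v2 = some true := by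
                    simpa [dirs] using A2
                  have S2 : runB (6^f + 1) lab ((x,y,1)::st) s2 v2 = some true := by
                    rw [runB_cons, if_neg (by norm_num)]; exact A2'
                  have A1 := (ih lab (x+1) y _ _ false s2 v2 h1 ((x,y,1)::st)).2 rfl (6^f + 1) true S2
                  have A1' : attemptB (6^f + (6^f + 1)) lab ((x,y,1)::st) (x + (dirs 0).1) (y + (dirs 0).2) (set2 sol x y 2) (set2 vis x y true) = some true := by
                    simpa [dirs] using A1
                  have S1 : runB (6^f + (6^f + 1) + 1) lab ((x,y,0)::st) (set2 sol x y 2) (set2 vis x y true) = some true := by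
                    rw [runB_cons, if_neg (by norm_num)]; exact A1'
                  simp only [attemptB]; rw [if_neg hg, if_pos hv]
                  exact runB_mono _ _ _ _ _ _ _ (by omega) S1
                · intro hb; rw [hb] at hbb; simp at hbb
              | false =>
                dsimp only at hA
                cases h3 : enterA f lab (x-1) y s3 v3 with
                | none => rw [h3] at hA; simp at hA
                | some p3 =>
                  obtain ⟨b3, s4, v4⟩ := p3
                  rw [h3] at hA
                  cases b3 with
                  | true =>
                    dsimp only at hA
                    simp only [Option.some_inj, Prod.mk.injEq] at hA
                    obtain ⟨hbb, -, -⟩ := hA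
                    constructor
                    · intro _
                      have A3 := (ih lab (x-1) y _ _ true s4 v4 h3 ((x,y,3)::st)).1 rfl
                      have A3' : attemptB (6^f) lab ((x,y,3)::st) (x + (dirs 2).1) (y + (dirs 2).2) s3 v3 = some true := by
                        simpa [dirs, sub_eq_add_neg] using A3
                      have S3 : runB (6^f + 1) lab ((x,y,2)::st) s3 v3 = some true := by
                        rw [runB_cons, if_neg (by norm_num)]; exact A3'
                      have A2 := (ih lab x (y+1) _ _ false s3 v3 h2 ((x,y,2)::st)).2 rfl (6^f + 1) true S3
                      have A2' : attemptB (6^f + (6^f + 1)) lab ((x,y,2)::st) (x + (dirs 1).1) (y + (dirs 1).2) s2 v2 = some true := by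
                        simpa [dirs] using A2
                      have S2 : runB (6^f + (6^f + 1) + 1) lab ((x,y,1)::st) s2 v2 = some true := by
                        rw [runB_cons, if_neg (by norm_num)]; exact A2'
                      have A1 := (ih lab (x+1) y _ _ false s2 v2 h1 ((x,y,1)::st)).2 rfl (6^f + (6^f + 1) + 1) true S2
                      have A1' : attemptB (6^f + (6^f + (6^f + 1) + 1)) lab ((x,y,1)::st) (x + (dirs 0).1) (y + (dirs 0).2) (set2 sol x y 2) (set2 vis x y true) = some true := by
                        simpa [dirs] using A1
                      have S1 : runB (6^f + (6^f + (6^f + 1) + 1) + 1) lab ((x,y,0)::st) (set2 sol x y 2) (set2 vis x y true) = some true := by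
                        rw [runB_cons, if_neg (by norm_num)]; exact A1'
                      simp only [attemptB]; rw [if_neg hg, if_pos hv]
                      exact runB_mono _ _ _ _ _ _ _ (by omega) S1
                    · intro hb; rw [hb] at hbb; simp at hbb
                  | false =>
                    dsimp only at hA
                    cases h4 : enterA f lab x (y-1) s4 v4 with
                    | none => rw [h4] at hA; simp at hA
                    | some p4 =>
                      obtain ⟨b4, s5, v5⟩ := p4
                      rw [h4] at hA
                      cases b4 with
                      | true =>
                        dsimp only at hA
                        simp only [Option.some_inj, Prod.mk.injEq] at hA
                        obtain ⟨hbb, -, -⟩ := hA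
                        constructor
                        · intro _
                          have A4 := (ih lab x (y-1) _ _ true s5 v5 h4 ((x,y,4)::st)).1 rfl
                          have A4' : attemptB (6^f) lab ((x,y,4)::st) (x + (dirs 3).1) (y + (dirs 3).2) s4 v4 = some true := by
                            simpa [dirs, sub_eq_add_neg] using A4
                          have S4 : runB (6^f + 1) lab ((x,y,3)::st) s4 v4 = some true := by
                            rw [runB_cons, if_neg (by norm_num)]; exact A4'
                          have A3 := (ih lab (x-1) y _ _ false s4 v4 h3 ((x,y,3)::st)).2 rfl (6^f + 1) true S4
                          have A3' : attemptB (6^f + (6^f + 1)) lab ((x,y,3)::st) (x + (dirs 2).1) (y + (dirs 2).2) s3 v3 = some true := by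
                            simpa [dirs, sub_eq_add_neg] using A3
                          have S3 : runB (6^f + (6^f + 1) + 1) lab ((x,y,2)::st) s3 v3 = some true := by
                            rw [runB_cons, if_neg (by norm_num)]; exact A3'
                          have A2 := (ih lab x (y+1) _ _ false s3 v3 h2 ((x,y,2)::st)).2 rfl (6^f + (6^f + 1) + 1) true S3
                          have A2' : attemptB (6^f + (6^f + (6^f + 1) + 1)) lab ((x,y,2)::st) (x + (dirs 1).1) (y + (dirs 1).2) s2 v2 = some true := by
                            simpa [dirs] using A2
                          have S2 : runB (6^f + (6^f + (6^f + 1) + 1) + 1) lab ((x,y,1)::st) s2 v2 = some true := by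
                            rw [runB_cons, if_neg (by norm_num)]; exact A2'
                          have A1 := (ih lab (x+1) y _ _ false s2 v2 h1 ((x,y,1)::st)).2 rfl (6^f + (6^f + (6^f + 1) + 1) + 1) true S2
                          have A1' : attemptB (6^f + (6^f + (6^f + (6^f + 1) + 1) + 1)) lab ((x,y,1)::st) (x + (dirs 0).1) (y + (dirs 0).2) (set2 sol x y 2) (set2 vis x y true) = some true := by
                            simpa [dirs] using A1
                          have S1 : runB (6^f + (6^f + (6^f + (6^f + 1) + 1) + 1) + 1) lab ((x,y,0)::st) (set2 sol x y 2) (set2 vis x y true) = some true := by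
                            rw [runB_cons, if_neg (by norm_num)]; exact A1'
                          simp only [attemptB]; rw [if_neg hg, if_pos hv]
                          exact runB_mono _ _ _ _ _ _ _ (by omega) S1
                        · intro hb; rw [hb] at hbb; simp at hbb
                      | false =>
                        dsimp only at hA
                        simp only [Option.some_inj, Prod.mk.injEq] at hA
                        obtain ⟨hbb, hss, hvv⟩ := hA
                        constructor
                        · intro ht; rw [ht] at hbb; simp at hbb
                        · intro _ fr r hr
                          have S5 : runB (fr + 1) lab ((x,y,4)::st) s5 v5 = some r := by
                            rw [runB_cons, if_pos (by norm_num)]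
                            rw [hss, hvv]; exact hr
                          have A4 := (ih lab x (y-1) _ _ false s5 v5 h4 ((x,y,4)::st)).2 rfl (fr + 1) r S5
                          have A4' : attemptB (6^f + (fr + 1)) lab ((x,y,4)::st) (x + (dirs 3).1) (y + (dirs 3).2) s4 v4 = some r := by
                            simpa [dirs, sub_eq_add_neg] using A4
                          have S4 : runB (6^f + (fr + 1) + 1) lab ((x,y,3)::st) s4 v4 = some r := by
                            rw [runB_cons, if_neg (by norm_num)]; exact A4'
                          have A3 := (ih lab (x-1) y _ _ false s4 v4 h3 ((x,y,3)::st)).2 rfl (6^f + (fr + 1) + 1) r S4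
                          have A3' : attemptB (6^f + (6^f + (fr + 1) + 1)) lab ((x,y,3)::st) (x + (dirs 2).1) (y + (dirs 2).2) s3 v3 = some r := by
                            simpa [dirs, sub_eq_add_neg] using A3
                          have S3 : runB (6^f + (6^f + (fr + 1) + 1) + 1) lab ((x,y,2)::st) s3 v3 = some r := by
                            rw [runB_cons, if_neg (by norm_num)]; exact A3'
                          have A2 := (ih lab x (y+1) _ _ false s3 v3 h2 ((x,y,2)::st)).2 rfl (6^f + (6^f + (fr + 1) + 1) + 1) r S3
                          have A2' : attemptB (6^f + (6^f + (6^f + (fr + 1) + 1) + 1)) lab ((x,y,2)::st) (x + (dirs 1).1) (y + (dirs 1).2) s2 v2 = some r := by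
                            simpa [dirs] using A2
                          have S2 : runB (6^f + (6^f + (6^f + (fr + 1) + 1) + 1) + 1) lab ((x,y,1)::st) s2 v2 = some r := by
                            rw [runB_cons, if_neg (by norm_num)]; exact A2'
                          have A1 := (ih lab (x+1) y _ _ false s2 v2 h1 ((x,y,1)::st)).2 rfl (6^f + (6^f + (6^f + (fr + 1) + 1) + 1) + 1) r S2
                          have A1' : attemptB (6^f + (6^f + (6^f + (6^f + (fr + 1) + 1) + 1) + 1)) lab ((x,y,1)::st) (x + (dirs 0).1) (y + (dirs 0).2) (set2 sol x y 2) (set2 vis x y true) = some r := by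
                            simpa [dirs] using A1
                          have S1 : runB (6^f + (6^f + (6^f + (6^f + (fr + 1) + 1) + 1) + 1) + 1) lab ((x,y,0)::st) (set2 sol x y 2) (set2 vis x y true) = some r := by
                            rw [runB_cons, if_neg (by norm_num)]; exact A1'
                          simp only [attemptB]; rw [if_neg hg, if_pos hv]
                          exact runB_mono _ _ _ _ _ _ _ (by omega) S1
      · rw [if_neg hv] at hA
        simp only [Option.some_inj, Prod.mk.injEq] at hA
        obtain ⟨hbb, hss, hvv⟩ := hA
        constructor
        · intro ht; rw [ht] at hbb; simp at hbb
        · intro _ fr r hr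
          simp only [attemptB]; rw [if_neg hg, if_neg hv]
          rw [← hss, ← hvv] at hr
          exact runB_mono _ _ _ _ _ _ _ (Nat.le_add_left fr _) hr

-- ===== VERDICT (by name: the statement is the Claim_ definition above) =====
theorem resolver_laberinto_spec : Claim_equal_resolver_laberinto := by
  intro lab x y sol vis _ hpre
  unfold Spec_resolver_laberinto
  obtain ⟨hne, hcase⟩ := hpre
  rcases hcase with ⟨hm1, hrect, hsl, hsr, hvl, hvr⟩ | ⟨hx, hy, hm1, hsl, hsr⟩ | ⟨hng, hcond⟩
  · -- well-formed rectangular input: the simulation argument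
    have sh : Shape lab vis := ⟨hvl, hvr⟩
    obtain ⟨⟨b, sol', vis'⟩, hA⟩ := enterA_total (cnt vis + 1) lab x y sol vis sh (by omega)
    have hres : resolver_laberinto lab x y sol vis = b := by
      unfold resolver_laberinto; rw [hA]
    rw [hres]
    unfold resolver_laberinto_alt
    by_cases hg : (x == (lab.length : Int) - 1 && y == (lab.headI.length : Int) - 1) = true
    · rw [if_pos hg]
      simp only [enterA] at hA; rw [if_pos hg] at hA
      simp only [Option.some_inj, Prod.mk.injEq] at hA
      exact hA.1.symm
    · rw [if_neg hg]
      by_cases hv : es_valido lab x y vis = true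
      · rw [if_pos hv]
        have hsim := simQ (cnt vis + 1) lab x y sol vis b sol' vis' hA []
        cases b with
        | true =>
          have At := hsim.1 rfl
          simp only [attemptB] at At; rw [if_neg hg, if_pos hv] at At
          have hrn := runB_mono _ (6 ^ (cnt vis + 1) + 1) _ _ _ _ _ (by omega) At
          rw [hrn]
        | false =>
          have hr0 : runB 1 lab [] sol' vis' = some false := rfl
          have At := hsim.2 rfl 1 false hr0
          simp only [attemptB] at At; rw [if_neg hg, if_pos hv] at At
          rw [At]
      · rw [if_neg hv]
        simp only [enterA] at hA; rw [if_neg hg, if_neg hv] at hA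
        simp only [Option.some_inj, Prod.mk.injEq] at hA
        exact hA.1.symm
  · -- the start is the goal cell: both return True immediately
    have hg : (x == (lab.length : Int) - 1 && y == (lab.headI.length : Int) - 1) = true := by
      simp [hx, hy]
    simp [resolver_laberinto, resolver_laberinto_alt, enterA, hg]
  · -- the start is immediately rejected by es_valido: both return False immediately
    have hgn : ¬((x == (lab.length : Int) - 1 && y == (lab.headI.length : Int) - 1) = true) := by
      simp only [Bool.and_eq_true, beq_iff_eq]; exact hng
    have hvn : ¬(es_valido lab x y vis = true) := by
      intro hv
      obtain ⟨hx0, hxn, hy0, hym, hI, hB⟩ := valid_parts lab x y vis hv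
      rcases hcond with hoob | ⟨_, _, _, _, hyr, hblk⟩
      · rcases hoob with h | h | h | h <;> omega
      · have hxl : x.toNat < lab.length := by omega
        have hrow : lab.getD x.toNat [] = lab[x.toNat] := List.getD_eq_getElem lab [] hxl
        have hyl : y.toNat < (lab[x.toNat]).length := by rw [← hrow]; exact hyr
        rcases hblk with hwall | ⟨hvx, hvy, hvt⟩
        · apply hwall
          rw [hrow, List.getD_eq_getElem _ _ hyl, ← get2I_eq lab x y hx0 hxl hy0 hyl]
          exact hI
        · have hrv : vis.getD x.toNat [] = vis[x.toNat] := List.getD_eq_getElem vis [] hvx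
          have hvy' : y.toNat < (vis[x.toNat]).length := by rw [← hrv]; exact hvy
          rw [hrv, List.getD_eq_getElem _ _ hvy'] at hvt
          rw [← get2B_eq vis x y hx0 hvx hy0 hvy'] at hvt
          rw [hB] at hvt; exact Bool.false_ne_true hvt
    simp only [Bool.not_eq_true] at hgn hvn
    simp [resolver_laberinto, resolver_laberinto_alt, enterA, hgn, hvn]
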